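-- pv_equiv track=rewrite | github.com/Moritz72/ToMaChess | scripts/functions_tiebreak.py | cut_list
-- ===== SOURCE A (Python) =====
-- from typing import TYPE_CHECKING, Sequence, cast
--
-- def cut_list(lis: Sequence[float], cut_up: int, cut_down: int) -> Sequence[float]:
--     while cut_up + cut_down > len(lis):
--         if cut_up >= cut_down:
--             cut_up -= 1
--         else:
--             cut_down -= 1
--     if cut_up:
--         return lis[cut_down:-cut_up]
--     return lis[cut_down:]
-- ===== SOURCE B (Python) =====
-- def cut_list(lis, cut_up, cut_down):
--     excess = cut_up + cut_down - len(lis)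
--     if excess > 0:
--         if cut_up - cut_down >= excess:
--             cut_up -= excess
--         elif cut_down - cut_up > excess:
--             cut_down -= excess
--         else:
--             n = len(lis)
--             cut_up, cut_down = n // 2, n - n // 2
--     if cut_up:
--         return lis[cut_down:-cut_up]
--     return lis[cut_down:]
-- ===== Notes on version B (the rewrite author's own statement) =====
-- stated objective: alternative
-- what changed: Replaced A's while loop that shrinks cut_up/cut_down one step at a time by a closed-form case analysis computing the final cut counts directly, followed by the same single slice.
import Mathlib
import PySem

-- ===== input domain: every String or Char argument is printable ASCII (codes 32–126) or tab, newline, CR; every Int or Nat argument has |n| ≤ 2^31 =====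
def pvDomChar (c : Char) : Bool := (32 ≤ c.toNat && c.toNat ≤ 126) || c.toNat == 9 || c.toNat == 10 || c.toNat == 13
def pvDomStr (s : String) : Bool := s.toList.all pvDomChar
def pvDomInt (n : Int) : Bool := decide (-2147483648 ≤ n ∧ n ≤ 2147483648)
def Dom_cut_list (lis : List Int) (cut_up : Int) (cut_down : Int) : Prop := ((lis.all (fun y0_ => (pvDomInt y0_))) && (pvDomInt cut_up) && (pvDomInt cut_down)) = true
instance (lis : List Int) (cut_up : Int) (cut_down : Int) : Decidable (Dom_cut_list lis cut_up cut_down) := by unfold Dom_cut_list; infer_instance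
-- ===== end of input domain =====

-- B replaces A's one-step-at-a-time while loop by closed-form case arithmetic for the final cut counts, then takes the same slice (the slice copy dominates, so no measured speedup).

-- ===== PORT A =====
-- while cut_up + cut_down > len(lis): decrement the larger (tie: cut_up).
-- fuel = (cut_up + cut_down - len).toNat is exactly the number of iterations the Python loop runs
-- (each iteration decreases cut_up + cut_down by 1), so this is a step-for-step transliteration.
def cutListLoop (fuel : Nat) (cut_up cut_down : Int) : Int × Int :=
  match fuel with
  | 0 => (cut_up, cut_down)
  | fuel + 1 =>
    if cut_up ≥ cut_down then cutListLoop fuel (cut_up - 1) cut_down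
    else cutListLoop fuel cut_up (cut_down - 1)

def cut_list (lis : List Int) (cut_up : Int) (cut_down : Int) : List Int :=
  let p := cutListLoop (cut_up + cut_down - lis.length).toNat cut_up cut_down
  if p.1 ≠ 0 then PySem.List.slice lis (some p.2) (some (-p.1))
  else PySem.List.slice lis (some p.2) none

-- ===== PORT B =====
def cut_list_alt (lis : List Int) (cut_up : Int) (cut_down : Int) : List Int :=
  let n : Int := lis.length
  let excess := cut_up + cut_down - n
  let p : Int × Int :=
    if excess > 0 then
      if cut_up - cut_down ≥ excess then (cut_up - excess, cut_down)
      else if cut_down - cut_up > excess then (cut_up, cut_down - excess)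
      else (PySem.Int.floordiv n 2, n - PySem.Int.floordiv n 2)
    else (cut_up, cut_down)
  if p.1 ≠ 0 then PySem.List.slice lis (some p.2) (some (-p.1))
  else PySem.List.slice lis (some p.2) none

-- ===== PRECONDITION & SPEC =====
def Spec_cut_list (lis : List Int) (cut_up : Int) (cut_down : Int) (out : List Int) : Prop := out = cut_list_alt lis cut_up cut_down
instance (lis : List Int) (cut_up : Int) (cut_down : Int) (out : List Int) : Decidable (Spec_cut_list lis cut_up cut_down out) := by unfold Spec_cut_list; infer_instance

-- ===== CLAIM (what is proved, stated in full; the proofs are below) =====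
def Claim_equal_cut_list : Prop := ∀ (lis : List Int) (cut_up : Int) (cut_down : Int), Dom_cut_list lis cut_up cut_down → Spec_cut_list lis cut_up cut_down (cut_list lis cut_up cut_down)

-- ===== LEMMAS AND PROOFS =====

-- closed-form target of the loop, as a function of the (nonnegative) list length
def cutTarget (n u d : Int) : Int × Int :=
  if u + d - n > 0 then
    if u - d ≥ u + d - n then (u - (u + d - n), d)
    else if d - u > u + d - n then (u, d - (u + d - n))
    else (PySem.Int.floordiv n 2, n - PySem.Int.floordiv n 2)
  else (u, d)

theorem cutListLoop_eq_target (fuel : Nat) (n u d : Int)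
    (hf : (u + d - n).toNat = fuel) : cutListLoop fuel u d = cutTarget n u d := by
  induction fuel generalizing u d with
  | zero =>
    unfold cutListLoop cutTarget
    rw [if_neg (by omega)]
  | succ k ih =>
    have hex : u + d - n = (k : Int) + 1 := by omega
    have hdiv : PySem.Int.floordiv n 2 = n / 2 :=
      PySem.Int.floordiv_eq_ediv_of_pos (by omega)
    by_cases hud : u ≥ d
    · rw [cutListLoop, if_pos hud, ih (u - 1) d (by omega)]
      unfold cutTarget
      rw [hdiv]
      split_ifs <;> first | rfl | (refine Prod.ext ?_ ?_ <;> simp <;> omega)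
    · rw [cutListLoop, if_neg hud, ih u (d - 1) (by omega)]
      unfold cutTarget
      rw [hdiv]
      split_ifs <;> first | rfl | (refine Prod.ext ?_ ?_ <;> simp <;> omega)

-- ===== VERDICT (by name: the statement is the Claim_ definition above) =====
theorem cut_list_spec : Claim_equal_cut_list := by
  intro lis u d _
  unfold Spec_cut_list cut_list cut_list_alt
  rw [cutListLoop_eq_target _ (lis.length : Int) u d rfl]
  rfl
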